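-- pv_equiv track=rewrite | github.com/machoneywell/Python | CS Labs/Lab5.py | twoLongestStrings
-- ===== SOURCE A (Python) =====
-- def twoLongestStrings(L):
--     # We initialize the variables that maintain the longest and second-longest
--     # strings
--     longestString = ""
--     secondLongestString = ""
--
--     # walk through the strings in L
--     for s in L:
--         # We discover a string longer than the previous longest string
--         if len(s) > len(longestString):
--             secondLongestString = longestString
--             longestString = s
--
--
--         # We discover a string longer than the previous second-longest
--         # string, though not longer than the previous longest string
--         elif len(s) > len(secondLongestString):
--             secondLongestString = s
--
--
--
--     return [longestString, secondLongestString]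
-- ===== SOURCE B (Python) =====
-- def twoLongestStrings(L):
--     ordered = sorted(L, key=len, reverse=True) + ["", ""]
--     return [ordered[0], ordered[1]]
-- ===== Notes on version B (the rewrite author's own statement) =====
-- stated objective: simpler
-- what changed: Replaces the single-pass top-two tracking loop with a stable length-descending sort (sorted(L, key=len, reverse=True)) padded with two empty strings, returning its first two elements.
import Mathlib
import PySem

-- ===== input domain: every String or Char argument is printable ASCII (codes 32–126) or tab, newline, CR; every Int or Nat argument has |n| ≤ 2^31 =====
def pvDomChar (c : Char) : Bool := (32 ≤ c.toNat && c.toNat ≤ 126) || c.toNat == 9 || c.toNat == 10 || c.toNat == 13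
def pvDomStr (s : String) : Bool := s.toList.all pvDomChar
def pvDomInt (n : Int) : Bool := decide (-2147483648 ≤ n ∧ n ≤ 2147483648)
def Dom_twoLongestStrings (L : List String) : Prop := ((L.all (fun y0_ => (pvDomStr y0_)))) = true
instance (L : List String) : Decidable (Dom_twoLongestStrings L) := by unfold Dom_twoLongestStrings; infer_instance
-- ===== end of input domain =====

-- B replaces A's single-pass top-two tracking by a stable length-descending sort, padding with
-- two empty strings and returning the first two elements (objective: simpler; not faster).

-- ===== PORT A =====
-- one pass over L, maintaining (longestString, secondLongestString)
def twoLongestStrings (L : List String) : List String :=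
  let st := L.foldl
    (fun (p : String × String) s =>
      if PySem.Str.len s > PySem.Str.len p.1 then (s, p.1)
      else if PySem.Str.len s > PySem.Str.len p.2 then (p.1, s)
      else p)
    ("", "")
  [st.1, st.2]

-- ===== PORT B =====
-- sorted(L, key=len, reverse=True) + ["", ""]; return its first two elements
def twoLongestStrings_alt (L : List String) : List String :=
  let ordered := PySem.List.sorted L (fun s => PySem.Str.len s) true ++ ["", ""]
  [PySem.List.pyGetD ordered 0 "", PySem.List.pyGetD ordered 1 ""]

-- ===== PRECONDITION & SPEC =====
def Spec_twoLongestStrings (L : List String) (out : List String) : Prop := out = twoLongestStrings_alt L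
instance (L : List String) (out : List String) : Decidable (Spec_twoLongestStrings L out) := by unfold Spec_twoLongestStrings; infer_instance

-- ===== CLAIM (what is proved, stated in full; the proofs are below) =====
def Claim_equal_twoLongestStrings : Prop := ∀ (L : List String), Dom_twoLongestStrings L → Spec_twoLongestStrings L (twoLongestStrings L)

-- ===== LEMMAS AND PROOFS =====

-- the first two elements of a list, padded with ""
def pvTop2 (acc : List String) : String × String := (acc.getD 0 "", acc.getD 1 "")

-- A's loop step
def pvStep (p : String × String) (s : String) : String × String :=
  if PySem.Str.len s > PySem.Str.len p.1 then (s, p.1)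
  else if PySem.Str.len s > PySem.Str.len p.2 then (p.1, s)
  else p

-- inserting one string into the accumulated (stable, descending) list changes its padded
-- first two elements exactly as A's loop step does
lemma pvTop2_insert (s : String) (acc : List String) :
    pvTop2 (PySem.List.insertBy
      (fun a b => decide (PySem.Str.len b < PySem.Str.len a)) s acc) = pvStep (pvTop2 acc) s := by
  match acc with
  | [] =>
      simp [PySem.List.insertBy, pvTop2, pvStep, PySem.Str.len_eq]
      split_ifs <;> first | rfl | simp_all
  | [y] =>
      simp [PySem.List.insertBy, pvTop2, pvStep, PySem.Str.len_eq]
      split_ifs <;> first | rfl | exact absurd rfl (by omega) | simp_all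
  | y :: z :: t =>
      simp [PySem.List.insertBy, pvTop2, pvStep, PySem.Str.len_eq]
      split_ifs <;> rfl
-- running A's loop from the first two elements of any accumulator equals taking the first two
-- elements after folding the insertions
lemma pv_fold_eq (L : List String) : ∀ acc : List String,
    L.foldl pvStep (pvTop2 acc) =
      pvTop2 (L.foldl (fun a x =>
        PySem.List.insertBy (fun a b => decide (PySem.Str.len b < PySem.Str.len a)) x a) acc) := by
  induction L with
  | nil => intro acc; rfl
  | cons s L ih =>
      intro acc
      simp only [List.foldl_cons]
      rw [← pvTop2_insert s acc, ih]

lemma pv_getD_append_pad (xs : List String) :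
    (xs ++ ["", ""]).getD 0 "" = xs.getD 0 "" ∧ (xs ++ ["", ""]).getD 1 "" = xs.getD 1 "" := by
  match xs with
  | [] => exact ⟨rfl, rfl⟩
  | [y] => exact ⟨rfl, rfl⟩
  | y :: z :: t => exact ⟨rfl, rfl⟩

-- ===== VERDICT (by name: the statement is the Claim_ definition above) =====
theorem twoLongestStrings_spec : Claim_equal_twoLongestStrings := by
  intro L _
  show twoLongestStrings L = twoLongestStrings_alt L
  have e2 := pv_fold_eq L []
  rw [← PySem.List.sorted_rev_eq_foldl_insertBy L (fun s => PySem.Str.len s)] at e2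
  have hpad := pv_getD_append_pad (PySem.List.sorted L (fun s => PySem.Str.len s) true)
  simp only [twoLongestStrings, twoLongestStrings_alt, PySem.List.pyGetD_ofNat', hpad.1, hpad.2]
  change [(L.foldl pvStep ("", "")).1, (L.foldl pvStep ("", "")).2] = _
  rw [show (("", "") : String × String) = pvTop2 [] from rfl, e2]
  rfl
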